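-- pv_equiv track=rewrite | github.com/MarcoBertetti/phd_nlp | code/helper_functions/topic_modelling/text_processing_parallel.py | convert_written_numbers_to_digits
-- ===== SOURCE A (Python) =====
-- NUMBER_MAP = {
--     "zero": 0, "one": 1, "two": 2, "three": 3, "four": 4, "five": 5,
--     "six": 6, "seven": 7, "eight": 8, "nine": 9, "ten": 10,
--     "eleven": 11, "twelve": 12, "thirteen": 13, "fourteen": 14,
--     "fifteen": 15, "sixteen": 16, "seventeen": 17, "eighteen": 18,
--     "nineteen": 19, "twenty": 20, "thirty": 30, "forty": 40, "fifty": 50,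
--     "sixty": 60, "seventy": 70, "eighty": 80, "ninety": 90,
--     "hundred": 100, "thousand": 1000, "million": 1_000_000
-- }
--
-- def parse_written_number(phrase: str):
--     tokens = phrase.lower().strip().replace("-", " ").split()
--     total = 0
--     current = 0
--
--     for tok in tokens:
--         if tok in NUMBER_MAP:
--             val = NUMBER_MAP[tok]
--             if val in {100, 1000, 1_000_000}:
--                 current = max(1, current) * val
--             else:
--                 current += val
--         else:
--             return None
--
--     return total + current if total + current > 0 else None
--
-- def convert_written_numbers_to_digits(text: str):
--     words = text.split()
--     converted_words = []
--     i = 0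
--
--     while i < len(words):
--         if words[i].lower() in NUMBER_MAP:
--             j = i
--             phrase_components = []
--             while j < len(words) and words[j].lower() in NUMBER_MAP:
--                 phrase_components.append(words[j].lower())
--                 j += 1
--
--             phrase_str = " ".join(phrase_components)
--             value = parse_written_number(phrase_str)
--
--             if value is not None:
--                 converted_words.append(str(value))
--                 i = j
--                 continue
--
--         converted_words.append(words[i])
--         i += 1
--
--     return " ".join(converted_words)
-- ===== SOURCE B (Python) =====
-- NUMBER_MAP = {
--     "zero": 0, "one": 1, "two": 2, "three": 3, "four": 4, "five": 5,
--     "six": 6, "seven": 7, "eight": 8, "nine": 9, "ten": 10,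
--     "eleven": 11, "twelve": 12, "thirteen": 13, "fourteen": 14,
--     "fifteen": 15, "sixteen": 16, "seventeen": 17, "eighteen": 18,
--     "nineteen": 19, "twenty": 20, "thirty": 30, "forty": 40, "fifty": 50,
--     "sixty": 60, "seventy": 70, "eighty": 80, "ninety": 90,
--     "hundred": 100, "thousand": 1000, "million": 1_000_000
-- }
--
--
-- def convert_written_numbers_to_digits(text: str):
--     # Single linear pass: accumulate the value of the current run of number
--     # words inline; flush it when a non-number word (or the end) is reached.
--     out = []
--     current = 0
--     run = []
--     for word in text.split():
--         val = NUMBER_MAP.get(word.lower())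
--         if val is not None:
--             if val in (100, 1000, 1_000_000):
--                 current = max(1, current) * val
--             else:
--                 current += val
--             run.append(word)
--         else:
--             if run:
--                 if current > 0:
--                     out.append(str(current))
--                 else:
--                     out.extend(run)
--                 current = 0
--                 run = []
--             out.append(word)
--     if run:
--         if current > 0:
--             out.append(str(current))
--         else:
--             out.extend(run)
--     return " ".join(out)
-- ===== Notes on version B (the rewrite author's own statement) =====
-- stated objective: alternative
-- what changed: Replaced A's index-based outer loop with an inner regrouping scan plus a join/re-split parse helper by a single fold over text.split() that accumulates the run's value inline and flushes it at each run boundary.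
import Mathlib
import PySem

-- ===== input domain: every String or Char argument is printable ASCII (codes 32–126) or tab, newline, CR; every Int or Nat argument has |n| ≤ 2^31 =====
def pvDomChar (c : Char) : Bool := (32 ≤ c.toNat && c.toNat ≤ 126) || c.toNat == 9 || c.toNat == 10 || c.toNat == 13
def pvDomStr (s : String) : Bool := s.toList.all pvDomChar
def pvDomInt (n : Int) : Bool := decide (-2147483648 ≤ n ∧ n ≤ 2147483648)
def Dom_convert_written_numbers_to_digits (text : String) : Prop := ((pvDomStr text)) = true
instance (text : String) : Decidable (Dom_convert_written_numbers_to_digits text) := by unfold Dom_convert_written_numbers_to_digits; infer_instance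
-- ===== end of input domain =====

-- B replaces A's regroup-then-join-then-reparse structure by a single fold over the words
-- that accumulates each number run's value inline (objective: alternative decomposition).

-- ===== PORT A =====
def pvNumberMap : PySem.Dict String Int := PySem.Dict.mk
  [("zero", 0), ("one", 1), ("two", 2), ("three", 3), ("four", 4), ("five", 5),
   ("six", 6), ("seven", 7), ("eight", 8), ("nine", 9), ("ten", 10),
   ("eleven", 11), ("twelve", 12), ("thirteen", 13), ("fourteen", 14),
   ("fifteen", 15), ("sixteen", 16), ("seventeen", 17), ("eighteen", 18),
   ("nineteen", 19), ("twenty", 20), ("thirty", 30), ("forty", 40), ("fifty", 50),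
   ("sixty", 60), ("seventy", 70), ("eighty", 80), ("ninety", 90),
   ("hundred", 100), ("thousand", 1000), ("million", 1000000)]

-- "words[j].lower() in NUMBER_MAP"
def pvNum (w : String) : Bool := (pvNumberMap.get? (PySem.Str.lower w)).isSome

-- the for-loop of parse_written_number ('return None' inside the loop = none)
def pvParseLoop : List String → Int → Option Int
  | [], current => some current
  | tok :: rest, current =>
    match pvNumberMap.get? tok with
    | some val =>
        pvParseLoop rest
          (if val = 100 ∨ val = 1000 ∨ val = 1000000 then max 1 current * val else current + val)
    | none => none

def pvParse (phrase : String) : Option Int :=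
  let tokens := PySem.Str.split₀
    (PySem.Str.replace (PySem.Str.strip (PySem.Str.lower phrase)) "-" " ")
  match pvParseLoop tokens 0 with
  | none => none
  | some current => if (0 : Int) + current > 0 then some (0 + current) else none

-- the while-loop of A over the remaining words (inner while = takeWhile/dropWhile)
def pvALoop : List String → List String
  | [] => []
  | w :: rest =>
    if h : pvNum w = true then
      -- 'if value is not None: … continue' / fall through to the non-number case
      (pvParse (PySem.Str.join " "
          ((List.takeWhile pvNum (w :: rest)).map PySem.Str.lower))).elim
        (w :: pvALoop rest)
        (fun v => PySem.Int.toStr v :: pvALoop (List.dropWhile pvNum (w :: rest)))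
    else w :: pvALoop rest
  termination_by l => l.length
  decreasing_by
    · simp
    · simp only [List.dropWhile_cons, h, if_true, List.length_cons]
      exact Nat.lt_succ_of_le (List.length_dropWhile_le _ _)
    · simp

def convert_written_numbers_to_digits (text : String) : String :=
  PySem.Str.join " " (pvALoop (PySem.Str.split₀ text))

-- ===== PORT B =====
def pvBStep : List String × Int × List String → String → List String × Int × List String
  | (out, current, run), word =>
    match pvNumberMap.get? (PySem.Str.lower word) with
    | some val =>
        (out,
         (if val = 100 ∨ val = 1000 ∨ val = 1000000 then max 1 current * val else current + val),
         run ++ [word])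
    | none =>
        if run.isEmpty then (out ++ [word], current, run)
        else ((if current > 0 then out ++ [PySem.Int.toStr current] else out ++ run) ++ [word], 0, [])

def pvBFlush : List String × Int × List String → List String
  | (out, current, run) =>
    if run.isEmpty then out
    else if current > 0 then out ++ [PySem.Int.toStr current] else out ++ run

def convert_written_numbers_to_digits_alt (text : String) : String :=
  PySem.Str.join " " (pvBFlush ((PySem.Str.split₀ text).foldl pvBStep ([], 0, [])))

-- ===== PRECONDITION & SPEC =====
def Spec_convert_written_numbers_to_digits (text : String) (out : String) : Prop := out = convert_written_numbers_to_digits_alt text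
instance (text : String) (out : String) : Decidable (Spec_convert_written_numbers_to_digits text out) := by unfold Spec_convert_written_numbers_to_digits; infer_instance

-- ===== CLAIM (what is proved, stated in full; the proofs are below) =====
def Claim_equal_convert_written_numbers_to_digits : Prop := ∀ (text : String), Dom_convert_written_numbers_to_digits text → Spec_convert_written_numbers_to_digits text (convert_written_numbers_to_digits text)

-- ===== LEMMAS AND PROOFS =====

theorem pvALoop_nil : pvALoop [] = [] := by unfold pvALoop; rfl

theorem pvALoop_cons (w : String) (rest : List String) :
    pvALoop (w :: rest) =
      if pvNum w = true then
        (pvParse (PySem.Str.join " "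
            ((List.takeWhile pvNum (w :: rest)).map PySem.Str.lower))).elim
          (w :: pvALoop rest)
          (fun v => PySem.Int.toStr v :: pvALoop (List.dropWhile pvNum (w :: rest)))
      else w :: pvALoop rest := by
  conv_lhs => unfold pvALoop
  rfl

-- value of a number word (defined exactly when pvNum holds)
def pvVal (w : String) : Int := (pvNumberMap.get? (PySem.Str.lower w)).getD 0

def pvStepV (c v : Int) : Int :=
  if v = 100 ∨ v = 1000 ∨ v = 1000000 then max 1 c * v else c + v

def pvRunValFrom (c : Int) (run : List String) : Int :=
  run.foldl (fun c w => pvStepV c (pvVal w)) c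

-- every key of NUMBER_MAP: nonempty, no whitespace, already lower-case, no '-'
def pvKeyOK (s : String) : Bool :=
  !s.toList.isEmpty &&
    s.toList.all (fun c => !PySem.Chars.isspace c && (PySem.Chars.lowerChar c == c) && (c != '-'))

theorem pv_get?_props (s : String) (v : Int) (h : pvNumberMap.get? s = some v) :
    pvKeyOK s = true ∧ 0 ≤ v ∧ (v = 0 ↔ s = "zero") := by
  have findProps : ∀ (l : List (String × Int)) (p : String × Int),
      List.find? (fun q => q.1 == s) l = some p → p.1 = s ∧ p ∈ l := by
    intro l
    induction l with
    | nil => intro p hp; simp at hp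
    | cons a as ih =>
      intro p hp
      by_cases ha : (a.1 == s) = true
      · rw [List.find?_cons_of_pos (p := fun (q : String × Int) => q.1 == s) ha] at hp
        cases hp
        exact ⟨eq_of_beq ha, by simp⟩
      · rw [List.find?_cons_of_neg (p := fun (q : String × Int) => q.1 == s) ha] at hp
        exact ⟨(ih p hp).1, by simp [(ih p hp).2]⟩
  unfold PySem.Dict.get? at h
  cases hf : List.find? (fun q => q.1 == s) pvNumberMap.items with
  | none => rw [hf] at h; simp at h
  | some p =>
    rw [hf] at h
    simp only [Option.map_some, Option.some.injEq] at h
    obtain ⟨hs, hmem⟩ := findProps _ _ hf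
    have hall : ∀ q ∈ pvNumberMap.items,
        pvKeyOK q.1 = true ∧ 0 ≤ q.2 ∧ (q.2 = 0 ↔ q.1 = "zero") := by decide
    have hp := hall p hmem
    rw [hs, h] at hp
    exact hp

theorem pv_num_props (w : String) (h : pvNum w = true) :
    pvNumberMap.get? (PySem.Str.lower w) = some (pvVal w) ∧
    pvKeyOK (PySem.Str.lower w) = true ∧ 0 ≤ pvVal w ∧
    (pvVal w = 0 ↔ PySem.Str.lower w = "zero") := by
  unfold pvNum at h
  cases hg : pvNumberMap.get? (PySem.Str.lower w) with
  | none => rw [hg] at h; simp at h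
  | some v =>
    have hv : pvVal w = v := by unfold pvVal; rw [hg]; rfl
    have hp := pv_get?_props _ _ hg
    exact ⟨by rw [hv], hp.1, by rw [hv]; exact hp.2.1, by rw [hv]; exact hp.2.2⟩

-- split₀.go consumes a whitespace-free block into cur
theorem pv_go_nospace (w : List Char) (hw : ∀ c ∈ w, PySem.Chars.isspace c = false) :
    ∀ (s cur : List Char) (acc : List (List Char)),
      PySem.Chars.split₀.go (w ++ s) cur acc = PySem.Chars.split₀.go s (w.reverse ++ cur) acc := by
  induction w with
  | nil => simp
  | cons c t ih =>
    intro s cur acc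
    have hc : PySem.Chars.isspace c = false := hw c (by simp)
    rw [List.cons_append, PySem.Chars.split₀.go, if_neg (by simp [hc])]
    rw [ih (fun x hx => hw x (by simp [hx])) s (c :: cur) acc]
    simp

theorem pv_go_join (parts : List (List Char)) (hne : parts ≠ [])
    (h : ∀ p ∈ parts, p ≠ [] ∧ ∀ c ∈ p, PySem.Chars.isspace c = false) :
    ∀ acc, PySem.Chars.split₀.go (PySem.Chars.join [' '] parts) [] acc = acc.reverse ++ parts := by
  induction parts with
  | nil => exact absurd rfl hne
  | cons p ps ih =>
    intro acc
    have hp := h p (by simp)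
    cases ps with
    | nil =>
      rw [PySem.Chars.join_singleton]
      have := pv_go_nospace p hp.2 [] [] acc
      simp only [List.append_nil] at this
      rw [this, PySem.Chars.split₀.go,
        if_neg (by simp [List.isEmpty_iff, hp.1])]
      simp
    | cons q qs =>
      rw [PySem.Chars.join_cons_cons, List.append_assoc,
        pv_go_nospace p hp.2 _ [] acc]
      simp only [List.append_nil, List.cons_append, List.nil_append]
      rw [PySem.Chars.split₀.go, if_pos (by decide),
        if_neg (by simp [List.isEmpty_iff, hp.1])]
      rw [ih (by simp) (fun x hx => h x (by simp [hx])) _]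
      simp

theorem pv_mem_join (parts : List (List Char)) (c : Char)
    (h : c ∈ PySem.Chars.join [' '] parts) : c = ' ' ∨ ∃ p ∈ parts, c ∈ p := by
  induction parts with
  | nil => simp [PySem.Chars.join, List.intercalate] at h
  | cons p ps ih =>
    cases ps with
    | nil =>
      rw [PySem.Chars.join_singleton] at h
      exact Or.inr ⟨p, by simp, h⟩
    | cons q qs =>
      rw [PySem.Chars.join_cons_cons] at h
      simp only [List.mem_append, List.mem_singleton] at h
      rcases h with (h | h) | h
      · exact Or.inr ⟨p, by simp, h⟩
      · exact Or.inl h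
      · rcases ih h with h' | ⟨r, hr, hcr⟩
        · exact Or.inl h'
        · exact Or.inr ⟨r, by simp [hr], hcr⟩

theorem pv_replace_noop (cs : List Char) (h : '-' ∉ cs) :
    PySem.Chars.replace cs ['-'] [' '] = cs := by
  have go_noop : ∀ (fuel : Nat) (l acc : List Char), '-' ∉ l →
      PySem.Chars.replace.go ['-'] [' '] fuel l acc = acc.reverse ++ l := by
    intro fuel
    induction fuel with
    | zero => intro l acc _; rw [PySem.Chars.replace.go]
    | succ n ih =>
      intro l acc hl
      cases l with
      | nil => rw [PySem.Chars.replace.go] <;> simp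
      | cons c t =>
        have hc : c ≠ '-' := fun hc => hl (by simp [hc])
        rw [PySem.Chars.replace.go,
          if_neg (by simp [List.isPrefixOf]; exact fun hh => absurd hh.symm hc)]
        rw [ih t (c :: acc) (fun ht => hl (by simp [ht]))]
        simp
  unfold PySem.Chars.replace
  rw [if_neg (by simp), go_noop cs.length cs [] h]
  simp

theorem pv_strip_noop (cs : List Char)
    (hh : ∀ x ∈ cs.head?, PySem.Chars.isspace x = false)
    (hl : ∀ x ∈ cs.getLast?, PySem.Chars.isspace x = false) :
    PySem.Chars.strip cs = cs := by
  unfold PySem.Chars.strip PySem.Chars.lstrip PySem.Chars.rstrip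
  cases cs with
  | nil => simp
  | cons c t =>
    have h1 : List.dropWhile PySem.Chars.isspace (c :: t) = c :: t := by
      simp [hh c (by simp)]
    rw [h1]
    cases hr : (c :: t).reverse with
    | nil => simp at hr
    | cons d u =>
      have hd : PySem.Chars.isspace d = false := by
        refine hl d ?_
        rw [← List.head?_reverse, hr]
        rfl
      have h2 : List.dropWhile PySem.Chars.isspace (d :: u) = d :: u := by simp [hd]
      rw [h2, ← hr, List.reverse_reverse]

theorem pv_join_ne_nil (parts : List (List Char)) (hne : parts ≠ [])
    (h : ∀ p ∈ parts, p ≠ []) : PySem.Chars.join [' '] parts ≠ [] := by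
  cases parts with
  | nil => exact absurd rfl hne
  | cons p ps =>
    cases ps with
    | nil => rw [PySem.Chars.join_singleton]; exact h p (by simp)
    | cons q qs =>
      rw [PySem.Chars.join_cons_cons]
      simp

theorem pv_join_edge (parts : List (List Char)) (hne : parts ≠ [])
    (h : ∀ p ∈ parts, p ≠ [] ∧ ∀ c ∈ p, PySem.Chars.isspace c = false) :
    (∀ x ∈ (PySem.Chars.join [' '] parts).head?, PySem.Chars.isspace x = false) ∧
    (∀ x ∈ (PySem.Chars.join [' '] parts).getLast?, PySem.Chars.isspace x = false) := by
  induction parts with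
  | nil => exact absurd rfl hne
  | cons p ps ih =>
    have hp := h p (by simp)
    cases ps with
    | nil =>
      rw [PySem.Chars.join_singleton]
      constructor
      · intro x hx
        exact hp.2 x (List.mem_of_mem_head? hx)
      · intro x hx
        exact hp.2 x (List.mem_of_mem_getLast? hx)
    | cons q qs =>
      rw [PySem.Chars.join_cons_cons]
      have ih' := ih (by simp) (fun x hx => h x (by simp [hx]))
      have hJ : PySem.Chars.join [' '] (q :: qs) ≠ [] :=
        pv_join_ne_nil _ (by simp) (fun x hx => (h x (by simp [hx])).1)
      constructor
      · intro x hx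
        rw [List.head?_append, List.head?_append] at hx
        cases hpl : p with
        | nil => exact absurd hpl hp.1
        | cons a t =>
          rw [hpl] at hx
          simp only [List.head?_cons, Option.some_or, Option.mem_def,
            Option.some.injEq] at hx
          subst hx
          exact hp.2 a (by simp [hpl])
      · intro x hx
        rw [List.getLast?_append, List.getLast?_append] at hx
        obtain ⟨y, hy⟩ : ∃ y, (PySem.Chars.join [' '] (q :: qs)).getLast? = some y := by
          cases hJl : PySem.Chars.join [' '] (q :: qs) with
          | nil => exact absurd hJl hJ
          | cons a t => exact ⟨(a :: t).getLast (by simp), List.getLast?_eq_some_getLast (by simp)⟩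
        rw [hy] at hx
        simp only [Option.some_or, Option.mem_def, Option.some.injEq] at hx
        subst hx
        exact ih'.2 y (by rw [hy]; rfl)

-- the tokens parse sees are exactly the lowered run
theorem pv_tokens (run : List String) (hne : run ≠ []) (h : ∀ w ∈ run, pvNum w = true) :
    PySem.Str.split₀
      (PySem.Str.replace
        (PySem.Str.strip (PySem.Str.lower (PySem.Str.join " " (run.map PySem.Str.lower)))) "-" " ")
      = run.map PySem.Str.lower := by
  set ls := run.map PySem.Str.lower with hls
  set ps := ls.map String.toList with hps
  have hpsne : ps ≠ [] := by
    simp [hps, hls]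
    exact hne
  have hkey : ∀ q ∈ ps, q ≠ [] ∧
      ∀ c ∈ q, PySem.Chars.isspace c = false ∧ PySem.Chars.lowerChar c = c ∧ c ≠ '-' := by
    intro q hq
    rw [hps, hls] at hq
    simp only [List.map_map, List.mem_map] at hq
    obtain ⟨w, hw, rfl⟩ := hq
    have hok := (pv_num_props w (h w hw)).2.1
    unfold pvKeyOK at hok
    simp only [Bool.and_eq_true, Bool.not_eq_true', List.isEmpty_eq_false_iff,
      List.all_eq_true, Function.comp] at hok
    refine ⟨by simpa using hok.1, ?_⟩
    intro c hc
    have := hok.2 c (by simpa using hc)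
    simp only [Bool.and_eq_true, Bool.not_eq_true', beq_iff_eq, bne_iff_ne] at this
    exact ⟨this.1.1, this.1.2, this.2⟩
  have hkey' : ∀ q ∈ ps, q ≠ [] ∧ ∀ c ∈ q, PySem.Chars.isspace c = false :=
    fun q hq => ⟨(hkey q hq).1, fun c hc => ((hkey q hq).2 c hc).1⟩
  -- the joined string
  have hS : (PySem.Str.join " " ls).toList = PySem.Chars.join [' '] ps := by
    simp [PySem.Str.join, String.toList_ofList, hps]
  -- .lower() is a no-op
  have hL : (PySem.Str.lower (PySem.Str.join " " ls)).toList = PySem.Chars.join [' '] ps := by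
    rw [PySem.Str.toList_lower, hS]
    unfold PySem.Chars.lower
    rw [List.map_congr_left, List.map_id]
    intro c hc
    rcases pv_mem_join ps c hc with rfl | ⟨q, hq, hcq⟩
    · decide
    · exact ((hkey q hq).2 c hcq).2.1
  -- .strip() is a no-op
  have hT : (PySem.Str.strip (PySem.Str.lower (PySem.Str.join " " ls))).toList
      = PySem.Chars.join [' '] ps := by
    rw [PySem.Str.toList_strip, hL]
    have hedge := pv_join_edge ps hpsne hkey'
    exact pv_strip_noop _ hedge.1 hedge.2
  -- .replace("-", " ") is a no-op
  have hR : (PySem.Str.replace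
      (PySem.Str.strip (PySem.Str.lower (PySem.Str.join " " ls))) "-" " ").toList
      = PySem.Chars.join [' '] ps := by
    rw [PySem.Str.toList_replace, hT]
    have hm : ('-' : Char) ∉ PySem.Chars.join [' '] ps := by
      intro hc
      rcases pv_mem_join ps '-' hc with he | ⟨q, hq, hcq⟩
      · exact absurd he (by decide)
      · exact ((hkey q hq).2 '-' hcq).2.2 rfl
    have : ("-" : String).toList = ['-'] := by decide
    rw [this]
    have : (" " : String).toList = [' '] := by decide
    rw [this]
    exact pv_replace_noop _ hm
  -- now split
  unfold PySem.Str.split₀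
  rw [hR]
  unfold PySem.Chars.split₀
  rw [pv_go_join ps hpsne hkey' []]
  rw [hps, hls]
  simp only [List.reverse_nil, List.nil_append, List.map_map]
  exact List.map_congr_left fun x _ => String.ofList_toList

theorem pv_parse_run (run : List String) (hne : run ≠ []) (h : ∀ w ∈ run, pvNum w = true) :
    pvParse (PySem.Str.join " " (run.map PySem.Str.lower))
      = if pvRunValFrom 0 run > 0 then some (pvRunValFrom 0 run) else none := by
  have hloop : ∀ (l : List String) (c : Int), (∀ w ∈ l, pvNum w = true) →
      pvParseLoop (l.map PySem.Str.lower) c = some (pvRunValFrom c l) := by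
    intro l
    induction l with
    | nil => intro c _; simp [pvParseLoop, pvRunValFrom]
    | cons w t ih =>
      intro c hl
      have hw := pv_num_props w (hl w (by simp))
      rw [List.map_cons, pvParseLoop, hw.1]
      have hfold : pvRunValFrom c (w :: t) = pvRunValFrom (pvStepV c (pvVal w)) t := by
        simp [pvRunValFrom]
      rw [hfold, ← ih _ (fun x hx => hl x (by simp [hx]))]
      rfl
  unfold pvParse
  rw [pv_tokens run hne h]
  simp only [hloop run 0 h]
  simp

theorem pv_runval_props (run : List String) :
    ∀ c : Int, 0 ≤ c → (∀ w ∈ run, pvNum w = true) →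
      0 ≤ pvRunValFrom c run ∧
      (pvRunValFrom c run = 0 ↔ c = 0 ∧ ∀ w ∈ run, PySem.Str.lower w = "zero") := by
  induction run with
  | nil => intro c hc _; refine ⟨by simpa [pvRunValFrom] using hc, ?_⟩; simp [pvRunValFrom]
  | cons w t ih =>
    intro c hc h
    have hw := pv_num_props w (h w (by simp))
    have hv0 : 0 ≤ pvVal w := hw.2.2.1
    have hstep : 0 ≤ pvStepV c (pvVal w) ∧
        (pvStepV c (pvVal w) = 0 ↔ c = 0 ∧ pvVal w = 0) := by
      unfold pvStepV
      split_ifs with hbig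
      · have h1 : (1 : Int) ≤ max 1 c := le_max_left _ _
        have hpos : 0 < max 1 c * pvVal w := by
          rcases hbig with hb | hb | hb <;> rw [hb] <;> nlinarith
        refine ⟨le_of_lt hpos, ?_, ?_⟩
        · intro hx; rw [hx] at hpos; exact absurd hpos (by omega)
        · rintro ⟨-, hv⟩
          rcases hbig with hb | hb | hb <;> omega
      · omega
    have ih' := ih (pvStepV c (pvVal w)) hstep.1 (fun x hx => h x (by simp [hx]))
    have hfold : pvRunValFrom c (w :: t) = pvRunValFrom (pvStepV c (pvVal w)) t := by
      simp [pvRunValFrom]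
    refine ⟨by rw [hfold]; exact ih'.1, ?_⟩
    rw [hfold, ih'.2, hstep.2, hw.2.2.2]
    constructor
    · rintro ⟨⟨hc0, hz⟩, ht⟩
      exact ⟨hc0, by intro x hx; rcases List.mem_cons.mp hx with rfl | hx; exact hz; exact ht x hx⟩
    · rintro ⟨hc0, hall⟩
      exact ⟨⟨hc0, hall w (by simp)⟩, fun x hx => hall x (by simp [hx])⟩

theorem pv_zero_run (r ws : List String)
    (h : ∀ w ∈ r, pvNum w = true ∧ PySem.Str.lower w = "zero")
    (hws : match ws with | [] => True | w :: _ => pvNum w = false) :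
    pvALoop (r ++ ws) = r ++ pvALoop ws := by
  have htkws : List.takeWhile pvNum ws = [] := by
    cases ws with
    | nil => rfl
    | cons b bs => simp only at hws; simp [List.takeWhile_cons, hws]
  revert h
  induction r with
  | nil => intro _; simp
  | cons a t ih =>
    intro h
    have ha := h a (by simp)
    have hnums : ∀ x ∈ a :: t, pvNum x = true := fun x hx => (h x hx).1
    have hzeros : ∀ x ∈ a :: t, PySem.Str.lower x = "zero" := fun x hx => (h x hx).2
    have htk : List.takeWhile pvNum (a :: (t ++ ws)) = a :: t := by
      have hsplit : a :: (t ++ ws) = (a :: t) ++ ws := rfl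
      rw [hsplit, List.takeWhile_append_of_pos hnums, htkws, List.append_nil]
    have hzval : pvRunValFrom 0 (a :: t) = 0 :=
      (pv_runval_props (a :: t) 0 le_rfl hnums).2.mpr ⟨rfl, hzeros⟩
    rw [List.cons_append, pvALoop_cons, if_pos ha.1, htk,
      pv_parse_run (a :: t) (by simp) hnums, hzval, if_neg (by omega)]
    simp [ih (fun x hx => h x (by simp [hx]))]

theorem pv_main (ws : List String) :
    ∀ (out : List String) (cur : Int) (run : List String),
      (∀ w ∈ run, pvNum w = true) → cur = pvRunValFrom 0 run →
      pvBFlush (ws.foldl pvBStep (out, cur, run)) = out ++ pvALoop (run ++ ws) := by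
  induction ws with
  | nil =>
    intro out cur run hnum hcur
    rw [List.foldl_nil, List.append_nil]
    by_cases hrun : run = []
    · subst hrun
      have h0 : cur = 0 := by simpa [pvRunValFrom] using hcur
      simp [pvBFlush, pvALoop_nil, h0]
    · obtain ⟨a, t, rfl⟩ := List.exists_cons_of_ne_nil hrun
      have props := pv_runval_props (a :: t) 0 le_rfl hnum
      by_cases hpos : cur > 0
      · have htk : List.takeWhile pvNum (a :: t) = a :: t := by
          have := List.takeWhile_append_of_pos (l₂ := ([] : List String)) hnum
          simpa using this
        have hdp : List.dropWhile pvNum (a :: t) = [] := by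
          have := List.dropWhile_append_of_pos (l₂ := ([] : List String)) hnum
          simpa using this
        rw [pvALoop_cons, if_pos (hnum a (by simp)), htk,
          pv_parse_run (a :: t) (by simp) hnum, ← hcur, if_pos hpos, hdp]
        simp [pvBFlush, hpos, pvALoop_nil]
      · have hz : cur = 0 := by
          have h1 := props.1
          rw [← hcur] at h1
          omega
        have hzeros : ∀ x ∈ a :: t, PySem.Str.lower x = "zero" := by
          have := props.2.mp (by rw [← hcur, hz])
          exact this.2
        have := pv_zero_run (a :: t) [] (fun x hx => ⟨hnum x hx, hzeros x hx⟩) trivial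
        rw [List.append_nil] at this
        rw [this]
        simp [pvBFlush, hpos, pvALoop_nil]
  | cons w rest ih =>
    intro out cur run hnum hcur
    rw [List.foldl_cons]
    by_cases hw : pvNum w = true
    · have hwp := pv_num_props w hw
      have hstep : pvBStep (out, cur, run) w = (out, pvStepV cur (pvVal w), run ++ [w]) := by
        simp only [pvBStep]
        rw [hwp.1]
        rfl
      have hnum' : ∀ x ∈ run ++ [w], pvNum x = true := by
        intro x hx
        rcases List.mem_append.mp hx with hx | hx
        · exact hnum x hx
        · rw [List.mem_singleton.mp hx]; exact hw
      have hcur' : pvStepV cur (pvVal w) = pvRunValFrom 0 (run ++ [w]) := by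
        rw [hcur]
        simp [pvRunValFrom, List.foldl_append]
      rw [hstep, ih out _ (run ++ [w]) hnum' hcur']
      rw [List.append_assoc, List.singleton_append]
    · have hwf : pvNum w = false := by simpa using hw
      have hget : pvNumberMap.get? (PySem.Str.lower w) = none := by
        unfold pvNum at hwf
        exact Option.not_isSome_iff_eq_none.mp (by simp [hwf])
      by_cases hrun : run = []
      · subst hrun
        have hstep : pvBStep (out, cur, []) w = (out ++ [w], cur, []) := by
          simp only [pvBStep]
          rw [hget]
          rfl
        rw [hstep, ih (out ++ [w]) cur [] (by simp) hcur]
        simp [pvALoop_cons, hw]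
      · obtain ⟨a, t, rfl⟩ := List.exists_cons_of_ne_nil hrun
        have props := pv_runval_props (a :: t) 0 le_rfl hnum
        have hstep : pvBStep (out, cur, a :: t) w =
            ((if cur > 0 then out ++ [PySem.Int.toStr cur] else out ++ (a :: t)) ++ [w], 0, []) := by
          simp only [pvBStep]
          rw [hget]
          rfl
        rw [hstep, ih _ 0 [] (by simp) (by simp [pvRunValFrom])]
        have htk : List.takeWhile pvNum ((a :: t) ++ (w :: rest)) = a :: t := by
          rw [List.takeWhile_append_of_pos hnum]
          simp [List.takeWhile_cons, hwf]
        have hdp : List.dropWhile pvNum ((a :: t) ++ (w :: rest)) = w :: rest := by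
          rw [List.dropWhile_append_of_pos hnum]
          simp [List.dropWhile_cons, hwf]
        by_cases hpos : cur > 0
        · rw [if_pos hpos]
          have hsplit : (a :: t) ++ (w :: rest) = a :: (t ++ (w :: rest)) := rfl
          rw [hsplit, pvALoop_cons, if_pos (hnum a (by simp)), ← hsplit, htk, hdp,
            pv_parse_run (a :: t) (by simp) hnum, ← hcur, if_pos hpos,
            pvALoop_cons, if_neg hw]
          simp
        · rw [if_neg hpos]
          have hz : cur = 0 := by
            have h1 := props.1
            rw [← hcur] at h1
            omega
          have hzeros : ∀ x ∈ a :: t, PySem.Str.lower x = "zero" := by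
            have := props.2.mp (by rw [← hcur, hz])
            exact this.2
          rw [pv_zero_run (a :: t) (w :: rest) (fun x hx => ⟨hnum x hx, hzeros x hx⟩) hwf,
            pvALoop_cons, if_neg hw]
          simp

-- ===== VERDICT (by name: the statement is the Claim_ definition above) =====
theorem convert_written_numbers_to_digits_spec : Claim_equal_convert_written_numbers_to_digits := by
  intro text _
  unfold Spec_convert_written_numbers_to_digits
  unfold convert_written_numbers_to_digits convert_written_numbers_to_digits_alt
  rw [pv_main (PySem.Str.split₀ text) [] 0 [] (by simp) rfl]
  simp
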